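-- pv_equiv track=rewrite | github.com/nlp-anonymous-happy/anonymous-KG-guided-NLP | src/text_processor/squad.py | renew_offset
-- ===== SOURCE A (Python) =====
-- def renew_offset(og_start, og_end, og_text, all_text):
--     for new_start in range(max(0, og_start-5), min(og_start+3, len(all_text))):
--         for new_end in range(max(0, og_end - 5), min(og_end + 3, len(all_text))):
--             if new_start > new_end:
--                 continue
--             entity_text = all_text[new_start: new_end + 1]
--             if og_text == entity_text:
--                 return new_start, new_end, entity_text
--     return None, None, og_text
-- ===== SOURCE B (Python) =====
-- def renew_offset(og_start, og_end, og_text, all_text):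
--     # A match requires the slice length to equal len(og_text), so new_end is
--     # determined by new_start; check only that one candidate per new_start.
--     L = len(og_text)
--     lo_e = max(0, og_end - 5)
--     hi_e = min(og_end + 3, len(all_text))
--     for new_start in range(max(0, og_start - 5), min(og_start + 3, len(all_text))):
--         new_end = new_start + L - 1
--         if L > 0 and lo_e <= new_end < hi_e and all_text[new_start:new_end + 1] == og_text:
--             return new_start, new_end, og_text
--     return None, None, og_text
-- ===== Notes on version B (the rewrite author's own statement) =====
-- stated objective: alternative
-- what changed: Replaced the nested scan over all (new_start,new_end) window pairs by a single loop over new_start that computes the unique candidate new_end = new_start+len(og_text)-1 (a slice can only equal og_text when lengths match) and checks it against the inner-range bounds.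
import Mathlib
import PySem

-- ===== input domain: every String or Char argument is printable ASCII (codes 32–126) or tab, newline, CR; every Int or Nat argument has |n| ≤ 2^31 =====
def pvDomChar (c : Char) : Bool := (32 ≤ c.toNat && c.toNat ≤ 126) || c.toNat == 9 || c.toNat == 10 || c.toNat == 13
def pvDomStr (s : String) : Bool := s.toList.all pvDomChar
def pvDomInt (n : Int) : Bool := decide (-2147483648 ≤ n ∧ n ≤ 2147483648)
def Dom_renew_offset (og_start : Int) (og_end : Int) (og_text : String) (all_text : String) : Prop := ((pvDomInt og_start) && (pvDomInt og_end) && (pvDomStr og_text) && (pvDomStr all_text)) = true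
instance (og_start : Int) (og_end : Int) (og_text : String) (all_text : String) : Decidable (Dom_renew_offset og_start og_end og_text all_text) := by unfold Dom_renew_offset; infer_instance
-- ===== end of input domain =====

-- B replaces A's nested window scan by a single loop that computes the unique
-- candidate new_end from new_start (alternative decomposition; return values identical).

-- ===== PORT A =====
-- inner 'for new_end in …' loop of A
def pvInnerA (all_text og_text : String) (new_start : Int) : List Int → Option (Option Int × Option Int × String)
  | [] => none
  | new_end :: rest =>
    if new_start > new_end then pvInnerA all_text og_text new_start rest
    else
      let entity_text := PySem.Str.slice all_text (some new_start) (some (new_end + 1))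
      if og_text = entity_text then some (some new_start, some new_end, entity_text)
      else pvInnerA all_text og_text new_start rest

-- outer 'for new_start in …' loop of A
def pvOuterA (all_text og_text : String) (og_end : Int) : List Int → Option (Option Int × Option Int × String)
  | [] => none
  | new_start :: rest =>
    match pvInnerA all_text og_text new_start
        (PySem.List.pyRange (max 0 (og_end - 5)) (min (og_end + 3) (PySem.Str.len all_text)) 1) with
    | some r => some r
    | none => pvOuterA all_text og_text og_end rest

def renew_offset (og_start : Int) (og_end : Int) (og_text : String) (all_text : String) : Option Int × Option Int × String :=
  (pvOuterA all_text og_text og_end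
      (PySem.List.pyRange (max 0 (og_start - 5)) (min (og_start + 3) (PySem.Str.len all_text)) 1)).getD
    (none, none, og_text)

-- ===== PORT B =====
-- B's single loop over new_start; the candidate new_end is computed, not searched
def pvLoopB (all_text og_text : String) (L lo_e hi_e : Int) : List Int → Option (Option Int × Option Int × String)
  | [] => none
  | new_start :: rest =>
    let new_end := new_start + L - 1
    if 0 < L ∧ lo_e ≤ new_end ∧ new_end < hi_e ∧
        PySem.Str.slice all_text (some new_start) (some (new_end + 1)) = og_text then
      some (some new_start, some new_end, og_text)
    else pvLoopB all_text og_text L lo_e hi_e rest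

def renew_offset_alt (og_start : Int) (og_end : Int) (og_text : String) (all_text : String) : Option Int × Option Int × String :=
  let L := PySem.Str.len og_text
  let lo_e := max 0 (og_end - 5)
  let hi_e := min (og_end + 3) (PySem.Str.len all_text)
  (pvLoopB all_text og_text L lo_e hi_e
      (PySem.List.pyRange (max 0 (og_start - 5)) (min (og_start + 3) (PySem.Str.len all_text)) 1)).getD
    (none, none, og_text)

-- ===== PRECONDITION & SPEC =====
def Spec_renew_offset (og_start : Int) (og_end : Int) (og_text : String) (all_text : String) (out : Option Int × Option Int × String) : Prop := out = renew_offset_alt og_start og_end og_text all_text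
instance (og_start : Int) (og_end : Int) (og_text : String) (all_text : String) (out : Option Int × Option Int × String) : Decidable (Spec_renew_offset og_start og_end og_text all_text out) := by unfold Spec_renew_offset; infer_instance

-- ===== CLAIM (what is proved, stated in full; the proofs are below) =====
def Claim_equal_renew_offset : Prop := ∀ (og_start : Int) (og_end : Int) (og_text : String) (all_text : String), Dom_renew_offset og_start og_end og_text all_text → Spec_renew_offset og_start og_end og_text all_text (renew_offset og_start og_end og_text all_text)

-- ===== LEMMAS AND PROOFS =====

-- string slice equality moved to the list side
theorem pv_slice_str_iff (all_text og_text : String) (a b : Int) :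
    PySem.Str.slice all_text (some a) (some b) = og_text ↔
      PySem.List.slice all_text.toList (some a) (some b) = og_text.toList := by
  constructor
  · intro h; have := congrArg String.toList h; simpa using this
  · intro h; apply String.toList_inj.mp; simpa using h

-- length of an in-range slice
theorem pv_slice_len (cs : List Char) (ns ne : Int) (h0 : 0 ≤ ns) (hle : ns ≤ ne)
    (hlt : ne < (cs.length : Int)) :
    (PySem.List.slice cs (some ns) (some (ne + 1))).length = (ne + 1 - ns).toNat := by
  rw [PySem.List.slice_toNat]
  · simp only [List.length_take, List.length_drop]
    omega
  · exact h0
  · omega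

-- characterization of A's inner loop over any bounded list of candidate end indices
theorem pvInnerA_spec (all_text og_text : String) (new_start : Int)
    (h0 : 0 ≤ new_start) (lst : List Int)
    (hbd : ∀ ne ∈ lst, ne < (all_text.toList.length : Int)) :
    pvInnerA all_text og_text new_start lst =
      if 0 < (og_text.toList.length : Int) ∧ (new_start + (og_text.toList.length : Int) - 1) ∈ lst ∧
          PySem.Str.slice all_text (some new_start) (some (new_start + (og_text.toList.length : Int))) = og_text then
        some (some new_start, some (new_start + (og_text.toList.length : Int) - 1), og_text)
      else none := by
  induction lst with
  | nil => simp [pvInnerA]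
  | cons ne rest ih =>
    have hbd' : ∀ x ∈ rest, x < (all_text.toList.length : Int) :=
      fun x hx => hbd x (List.mem_cons_of_mem _ hx)
    have hne : ne < (all_text.toList.length : Int) := hbd ne List.mem_cons_self
    set L : Int := (og_text.toList.length : Int) with hL
    by_cases hgt : new_start > ne
    · rw [pvInnerA, if_pos hgt, ih hbd']
      refine if_congr ?_ rfl rfl
      constructor
      · rintro ⟨h1, h2, h3⟩; exact ⟨h1, List.mem_cons_of_mem _ h2, h3⟩
      · rintro ⟨h1, h2, h3⟩
        refine ⟨h1, ?_, h3⟩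
        rcases List.mem_cons.mp h2 with h | h
        · omega
        · exact h
    · rw [pvInnerA, if_neg hgt]
      by_cases heq : og_text = PySem.Str.slice all_text (some new_start) (some (ne + 1))
      · -- the head matches: the length of the slice pins ne = new_start + L - 1
        have hlist : PySem.List.slice all_text.toList (some new_start) (some (ne + 1)) = og_text.toList :=
          (pv_slice_str_iff all_text og_text _ _).mp heq.symm
        have hlen := pv_slice_len all_text.toList new_start ne h0 (by omega) hne
        rw [hlist] at hlen
        have hLeq : L = ne + 1 - new_start := by omega
        rw [if_pos heq]
        rw [if_pos ⟨by omega, by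
            refine List.mem_cons.mpr (Or.inl ?_); omega,
          by rw [show new_start + L = ne + 1 by omega]; exact heq.symm⟩]
        refine congrArg some ?_
        refine Prod.ext rfl (Prod.ext ?_ ?_) <;> simp
        · omega
        · exact heq.symm
      · rw [if_neg heq, ih hbd']
        refine if_congr ?_ rfl rfl
        constructor
        · rintro ⟨h1, h2, h3⟩; exact ⟨h1, List.mem_cons_of_mem _ h2, h3⟩
        · rintro ⟨h1, h2, h3⟩
          refine ⟨h1, ?_, h3⟩
          rcases List.mem_cons.mp h2 with h | h
          · exfalso
            apply heq
            rw [show ne + 1 = new_start + L by omega]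
            exact h3.symm
          · exact h

theorem pv_loops_eq (all_text og_text : String) (og_end : Int) (lst : List Int)
    (hpos : ∀ ns ∈ lst, 0 ≤ ns) :
    pvOuterA all_text og_text og_end lst =
      pvLoopB all_text og_text (PySem.Str.len og_text) (max 0 (og_end - 5))
        (min (og_end + 3) (PySem.Str.len all_text)) lst := by
  induction lst with
  | nil => simp [pvOuterA, pvLoopB]
  | cons ns rest ih =>
    have hns : 0 ≤ ns := hpos ns List.mem_cons_self
    have hlenA : PySem.Str.len all_text = (all_text.toList.length : Int) := by simp
    have hlenO : PySem.Str.len og_text = (og_text.toList.length : Int) := by simp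
    set L : Int := (og_text.toList.length : Int) with hL
    rw [pvOuterA, pvLoopB,
      pvInnerA_spec all_text og_text ns hns _
        (fun ne hne => by
          have h := (PySem.List.mem_pyRange_one.mp hne).2
          omega),
      hlenA, hlenO]
    by_cases hc : 0 < L ∧ max 0 (og_end - 5) ≤ ns + L - 1 ∧ ns + L - 1 < min (og_end + 3) ((all_text.toList.length : Int)) ∧
        PySem.Str.slice all_text (some ns) (some (ns + L - 1 + 1)) = og_text
    · rw [if_pos hc]
      rw [if_pos ⟨hc.1, PySem.List.mem_pyRange_one.mpr ⟨hc.2.1, hc.2.2.1⟩, by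
        rw [show ns + L = ns + L - 1 + 1 by omega]; exact hc.2.2.2⟩]
    · rw [if_neg hc, if_neg (by
        rintro ⟨h1, h2, h3⟩
        have hm := PySem.List.mem_pyRange_one.mp h2
        exact hc ⟨h1, hm.1, hm.2, by rw [show ns + L - 1 + 1 = ns + L by omega]; exact h3⟩)]
      exact ih (fun x hx => hpos x (List.mem_cons_of_mem _ hx))

-- ===== VERDICT (by name: the statement is the Claim_ definition above) =====
theorem renew_offset_spec : Claim_equal_renew_offset := by
  intro og_start og_end og_text all_text _
  unfold Spec_renew_offset renew_offset renew_offset_alt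
  rw [pv_loops_eq]
  intro ns hns
  have := (PySem.List.mem_pyRange_one.mp hns).1
  omega
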